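-- pv_equiv track=rewrite | github.com/wendersonbrum/desenvolve-python-basico | modulo 6/aula4_questao1.py | encontrar_intervalo_maior_negativos
-- ===== SOURCE A (Python) =====
-- def encontrar_intervalo_maior_negativos(lista):
--     max_negativos = 0
--     melhor_inicio = 0
--     melhor_fim = 0
--
--     for inicio in range(len(lista)):
--         for fim in range(inicio + 1, len(lista) + 1):
--             sublista = lista[inicio:fim]
--             count_negativos = sum(1 for x in sublista if x < 0)
--             if count_negativos > max_negativos:
--                 max_negativos = count_negativos
--                 melhor_inicio = inicio
--                 melhor_fim = fim
--
--     return melhor_inicio, melhor_fim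
-- ===== SOURCE B (Python) =====
-- def encontrar_intervalo_maior_negativos(lista):
--     # The maximal number of negatives in any subarray is the total number of
--     # negatives, first attained (in A's scan order) by the prefix ending just
--     # after the last negative element (an empty prefix if there is none).
--     n = len(lista)
--     for i, x in enumerate(reversed(lista)):
--         if x < 0:
--             return 0, n - i
--     return 0, 0
-- ===== Notes on version B (the rewrite author's own statement) =====
-- stated objective: faster
-- what changed: Replaced the O(n^3) scan over all subarrays by a single backward scan: the maximum negative count equals the total number of negatives, first reached by the prefix ending just after the last negative element (an empty prefix if there is none).
import Mathlib
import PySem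

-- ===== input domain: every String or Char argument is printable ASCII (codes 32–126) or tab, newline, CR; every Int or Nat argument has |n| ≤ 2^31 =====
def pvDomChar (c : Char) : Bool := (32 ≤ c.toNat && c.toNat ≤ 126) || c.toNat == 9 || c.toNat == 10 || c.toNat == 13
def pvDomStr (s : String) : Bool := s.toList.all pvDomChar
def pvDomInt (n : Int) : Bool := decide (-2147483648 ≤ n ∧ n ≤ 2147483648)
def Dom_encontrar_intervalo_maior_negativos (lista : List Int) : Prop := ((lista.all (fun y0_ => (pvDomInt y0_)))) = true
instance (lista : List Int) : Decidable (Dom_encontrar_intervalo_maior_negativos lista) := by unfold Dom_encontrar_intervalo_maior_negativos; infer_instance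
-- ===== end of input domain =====

-- B replaces A's O(n^3) scan over all subarrays by one backward scan for the
-- last negative element: the maximum negative count over subarrays equals the
-- total number of negatives, first reached (in A's scan order) by the prefix
-- ending just after the last negative element (an empty prefix if there is none).

-- ===== PORT A =====
def encontrar_intervalo_maior_negativos (lista : List Int) : Int × Int :=
  let n : Int := (lista.length : Int)
  let st :=
    (PySem.List.pyRange 0 n 1).foldl (fun st inicio =>
      (PySem.List.pyRange (inicio + 1) (n + 1) 1).foldl (fun st fim =>
        let sublista := PySem.List.slice lista (some inicio) (some fim)
        let count_negativos : Int :=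
          (sublista.map (fun x => if x < 0 then (1 : Int) else 0)).sum
        if count_negativos > st.1 then (count_negativos, inicio, fim) else st) st)
      ((0 : Int), (0 : Int), (0 : Int))
  (st.2.1, st.2.2)

-- ===== PORT B =====
-- early-return loop 'for i, x in enumerate(reversed(lista)): if x < 0: return 0, n - i'
def pvFindEnd : List Int → Int → Int
  | [], _ => 0
  | x :: rest, m => if x < 0 then m else pvFindEnd rest (m - 1)

def encontrar_intervalo_maior_negativos_alt (lista : List Int) : Int × Int :=
  ((0 : Int), pvFindEnd lista.reverse (lista.length : Int))

-- ===== PRECONDITION & SPEC =====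
def Spec_encontrar_intervalo_maior_negativos (lista : List Int) (out : Int × Int) : Prop := out = encontrar_intervalo_maior_negativos_alt lista
instance (lista : List Int) (out : Int × Int) : Decidable (Spec_encontrar_intervalo_maior_negativos lista out) := by unfold Spec_encontrar_intervalo_maior_negativos; infer_instance

-- ===== CLAIM (what is proved, stated in full; the proofs are below) =====
def Claim_equal_encontrar_intervalo_maior_negativos : Prop := ∀ (lista : List Int), Dom_encontrar_intervalo_maior_negativos lista → Spec_encontrar_intervalo_maior_negativos lista (encontrar_intervalo_maior_negativos lista)

-- ===== LEMMAS AND PROOFS =====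

-- number of negatives in the first k elements
def pvCnt (lista : List Int) (k : Nat) : Nat :=
  (lista.take k).countP (fun x => decide (x < 0))

-- 1 + index of the last negative among the first k elements (0 if none)
def pvG (lista : List Int) (k : Nat) : Nat :=
  ((lista.take k).reverse.dropWhile (fun x => decide (0 ≤ x))).length

theorem pvFindEnd_eq (r : List Int) :
    pvFindEnd r (r.length : Int) = ((r.dropWhile (fun x => decide (0 ≤ x))).length : Int) := by
  induction r with
  | nil => simp [pvFindEnd]
  | cons x rest ih =>
    by_cases hx : x < 0
    · simp [pvFindEnd, hx, show ¬ (0 ≤ x) by omega]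
    · have h0 : (0 : Int) ≤ x := by omega
      simp [pvFindEnd, hx, h0]
      exact ih

theorem pvSumIte (l : List Int) :
    (l.map (fun x => if x < 0 then (1 : Int) else 0)).sum
      = ((l.countP (fun x => decide (x < 0)) : Nat) : Int) := by
  induction l with
  | nil => simp
  | cons x rest ih =>
    by_cases hx : x < 0 <;> simp [List.countP_cons, hx, ih] <;> push_cast <;> ring

theorem pvFoldlId {α β : Type} (l : List β) (st : α) (f : α → β → α)
    (h : ∀ x ∈ l, f st x = st) : l.foldl f st = st := by
  induction l with
  | nil => rfl
  | cons x rest ih =>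
    rw [List.foldl_cons, h x (by simp)]
    exact ih (fun y hy => h y (by simp [hy]))

-- count of negatives in any slice is at most the total count
theorem pvCountSlice_le (lista : List Int) (a b : Int) (ha : 0 ≤ a) (hb : 0 ≤ b) :
    (PySem.List.slice lista (some a) (some b)).countP (fun x => decide (x < 0))
      ≤ lista.countP (fun x => decide (x < 0)) := by
  rw [PySem.List.slice_toNat lista ha hb]
  exact (((lista.drop a.toNat).take_sublist _).trans (lista.drop_sublist _)).countP_le

-- the inner loop at inicio = 0, characterised
theorem pvInner0 (lista : List Int) (k : Nat) (hk : k ≤ lista.length) :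
    (List.range k).foldl (fun st (j : Nat) =>
        let fim : Int := 1 + (j : Int)
        let sublista := PySem.List.slice lista (some 0) (some fim)
        let count : Int :=
          (sublista.map (fun x => if x < 0 then (1 : Int) else 0)).sum
        if count > st.1 then (count, (0 : Int), fim) else st)
      ((0 : Int), (0 : Int), (0 : Int))
    = ((pvCnt lista k : Int), (0 : Int), (pvG lista k : Int)) := by
  induction k with
  | zero => simp [pvCnt, pvG]
  | succ k ih =>
    have hk' : k < lista.length := by omega
    rw [List.range_succ, List.foldl_append, ih (by omega), List.foldl_cons, List.foldl_nil]
    have hslice : PySem.List.slice lista (some 0) (some (1 + (k : Int)))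
        = lista.take (k + 1) := by
      rw [PySem.List.slice_zero_start, PySem.List.slice_to lista (by omega : (0:Int) ≤ 1 + (k:Int))]
      congr 1
      omega
    have ht : lista.take (k + 1) = lista.take k ++ [lista[k]] := by
      rw [List.take_add_one, List.getElem?_eq_getElem hk']
      rfl
    have hcntS : (lista.take (k + 1)).countP (fun x => decide (x < 0))
        = pvCnt lista k + (if lista[k] < 0 then 1 else 0) := by
      unfold pvCnt
      rw [ht, List.countP_append]
      by_cases hneg : lista[k] < 0
      · rw [if_pos hneg]
        simp [hneg]
      · rw [if_neg hneg]
        simp [hneg]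
    have hgS : pvG lista (k + 1) = if lista[k] < 0 then k + 1 else pvG lista k := by
      unfold pvG
      rw [ht, List.reverse_append]
      by_cases hneg : lista[k] < 0
      · rw [if_pos hneg]
        simp [List.dropWhile_cons, show ¬((0:Int) ≤ lista[k]) by omega,
          List.length_take, Nat.min_eq_left (le_of_lt hk')]
      · rw [if_neg hneg]
        simp [List.dropWhile_cons, show (0:Int) ≤ lista[k] by omega]
    have h1 : pvCnt lista (k + 1) = pvCnt lista k + (if lista[k] < 0 then 1 else 0) := hcntS
    simp only [hslice, pvSumIte, hcntS]
    by_cases hneg : lista[k] < 0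
    · rw [if_pos (by simp [hneg] <;> omega)]
      simp [Prod.ext_iff, h1, hgS, hneg] <;> omega
    · rw [if_neg (by simp [hneg])]
      simp [Prod.ext_iff, h1, hgS, hneg]

-- ===== VERDICT (by name: the statement is the Claim_ definition above) =====
theorem encontrar_intervalo_maior_negativos_spec : Claim_equal_encontrar_intervalo_maior_negativos := by
  intro lista _
  unfold Spec_encontrar_intervalo_maior_negativos
  unfold encontrar_intervalo_maior_negativos encontrar_intervalo_maior_negativos_alt
  dsimp only
  rcases Nat.eq_zero_or_pos lista.length with h0 | hpos
  · have hnil : lista = [] := List.eq_nil_of_length_eq_zero h0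
    subst hnil
    simp [PySem.List.pyRange_one_eq_nil, pvFindEnd]
  · have h01 : (0 : Int) < (lista.length : Int) := by exact_mod_cast hpos
    rw [PySem.List.pyRange_one_cons h01, List.foldl_cons]
    have hlen : (((lista.length : Int) + 1 - 1)).toNat = lista.length := by omega
    rw [show ((0 : Int) + 1) = 1 by ring, PySem.List.pyRange_one 1 ((lista.length : Int) + 1)]
    rw [hlen, List.foldl_map]
    rw [pvInner0 lista lista.length le_rfl]
    have hfix : (PySem.List.pyRange 1 (lista.length : Int) 1).foldl
        (fun st inicio =>
          (PySem.List.pyRange (inicio + 1) ((lista.length : Int) + 1) 1).foldl (fun st fim =>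
            let sublista := PySem.List.slice lista (some inicio) (some fim)
            let count_negativos : Int :=
              (sublista.map (fun x => if x < 0 then (1 : Int) else 0)).sum
            if count_negativos > st.1 then (count_negativos, inicio, fim) else st) st)
        ((pvCnt lista lista.length : Int), (0 : Int), (pvG lista lista.length : Int))
        = ((pvCnt lista lista.length : Int), (0 : Int), (pvG lista lista.length : Int)) := by
      apply pvFoldlId
      intro inicio hini
      apply pvFoldlId
      intro fim hfim
      have h1 : (1 : Int) ≤ inicio := (PySem.List.mem_pyRange_one.mp hini).1
      have h2 : inicio + 1 ≤ fim := (PySem.List.mem_pyRange_one.mp hfim).1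
      have hle := pvCountSlice_le lista inicio fim (by omega) (by omega)
      have hT : pvCnt lista lista.length = lista.countP (fun x => decide (x < 0)) := by
        simp [pvCnt]
      simp only [pvSumIte]
      rw [if_neg]
      simp only [gt_iff_lt, not_lt]
      rw [hT]
      exact_mod_cast hle
    rw [hfix]
    have hB : pvFindEnd lista.reverse (lista.length : Int)
        = ((lista.reverse.dropWhile (fun x => decide (0 ≤ x))).length : Int) := by
      have h := pvFindEnd_eq lista.reverse
      simpa using h
    have hG : pvG lista lista.length
        = (lista.reverse.dropWhile (fun x => decide (0 ≤ x))).length := by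
      simp [pvG]
    simp [hB, hG]
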